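-- pv_equiv track=rewrite | github.com/zxia8/CHiME5_data | chime5/Time_sorting.py | get_blank_time
-- ===== SOURCE A (Python) =====
-- def get_blank_time(speak_time):
--     blank_time_zone = []
--     blank_time_start = '0:00:00.00'
--     for time_zone in speak_time:
--         blank_time_end = time_zone[0]
--         blank_time_zone.append((blank_time_start, blank_time_end))
--         blank_time_start = time_zone[1]
--     return blank_time_zone
-- ===== SOURCE B (Python) =====
-- def get_blank_time(speak_time):
--     ends = [tz[0] for tz in speak_time]
--     starts = ['0:00:00.00'] + [tz[1] for tz in speak_time[:-1]]
--     return list(zip(starts, ends))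
-- ===== Notes on version B (the rewrite author's own statement) =====
-- stated objective: idiomatic
-- what changed: Replaces the threaded start-accumulator loop with pairing a sentinel-prepended shifted list of zone ends against the list of zone starts via zip.
import Mathlib
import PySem

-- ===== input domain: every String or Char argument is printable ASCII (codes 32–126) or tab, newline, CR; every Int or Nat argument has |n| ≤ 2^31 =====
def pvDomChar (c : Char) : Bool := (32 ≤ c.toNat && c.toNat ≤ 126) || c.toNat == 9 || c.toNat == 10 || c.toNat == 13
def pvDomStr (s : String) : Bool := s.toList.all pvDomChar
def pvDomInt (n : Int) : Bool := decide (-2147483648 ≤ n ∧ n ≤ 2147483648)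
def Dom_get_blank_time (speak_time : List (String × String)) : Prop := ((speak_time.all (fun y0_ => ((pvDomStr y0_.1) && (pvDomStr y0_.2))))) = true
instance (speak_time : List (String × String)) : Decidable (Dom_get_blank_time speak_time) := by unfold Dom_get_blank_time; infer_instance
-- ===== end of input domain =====

-- B replaces A's threaded start-accumulator loop with zipping a sentinel-prepended shifted list of zone ends against the zone starts (idiomatic, same cost).


-- ===== PORT A =====
def get_blank_time (speak_time : List (String × String)) : List (String × String) :=
  -- for time_zone in speak_time: append (start, tz[0]); start := tz[1]
  (speak_time.foldl
    (fun (st : List (String × String) × String) time_zone =>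
      (st.1 ++ [(st.2, time_zone.1)], time_zone.2))
    ([], "0:00:00.00")).1

-- ===== PORT B =====
def get_blank_time_alt (speak_time : List (String × String)) : List (String × String) :=
  let ends := speak_time.map (fun tz => tz.1)
  let starts := "0:00:00.00" :: (PySem.List.slice speak_time none (some (-1))).map (fun tz => tz.2)
  starts.zip ends

-- ===== PRECONDITION & SPEC =====
def Spec_get_blank_time (speak_time : List (String × String)) (out : List (String × String)) : Prop := out = get_blank_time_alt speak_time
instance (speak_time : List (String × String)) (out : List (String × String)) : Decidable (Spec_get_blank_time speak_time out) := by unfold Spec_get_blank_time; infer_instance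

-- ===== CLAIM (what is proved, stated in full; the proofs are below) =====
def Claim_equal_get_blank_time : Prop := ∀ (speak_time : List (String × String)), Dom_get_blank_time speak_time → Spec_get_blank_time speak_time (get_blank_time speak_time)

-- ===== LEMMAS AND PROOFS =====

-- ===== VERDICT (by name: the statement is the Claim_ definition above) =====
-- loop invariant for A's fold, with the accumulator and start generalized
theorem gbt_fold (l : List (String × String)) (acc : List (String × String)) (s : String) :
    (l.foldl (fun (st : List (String × String) × String) time_zone =>
      (st.1 ++ [(st.2, time_zone.1)], time_zone.2)) (acc, s)).1
    = acc ++ (s :: l.dropLast.map (fun tz => tz.2)).zip (l.map (fun tz => tz.1)) := by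
  induction l generalizing acc s with
  | nil => simp
  | cons h t ih =>
      rw [List.foldl_cons, ih]
      cases t with
      | nil => simp
      | cons h2 t2 => simp

theorem get_blank_time_spec : Claim_equal_get_blank_time := by
  intro speak_time _
  show get_blank_time speak_time = get_blank_time_alt speak_time
  unfold get_blank_time get_blank_time_alt
  rw [gbt_fold, PySem.List.slice_to_neg_one]
  simp
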